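-- pv_equiv track=rewrite | github.com/massimoalbarello/consensus_on_demand | start_replicas.py | fillMissingElements
-- ===== SOURCE A (Python) =====
-- def fillMissingElements(iterations, metrics, default_element):
--     filled_iterations = []
--     filled_metrics = []
--     for i in range(min(iterations), max(iterations) + 1):
--         if i in iterations:
--             index = iterations.index(i)
--             filled_iterations.append(iterations[index])
--             filled_metrics.append(metrics[index])
--         else:
--             filled_iterations.append(i)
--             filled_metrics.append(default_element)
--     return filled_iterations, filled_metrics
-- ===== SOURCE B (Python) =====
-- def fillMissingElements(iterations, metrics, default_element):
--     mn = min(iterations)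
--     mx = max(iterations)
--     filled_iterations = list(range(mn, mx + 1))
--     filled_metrics = [default_element] * len(filled_iterations)
--     for idx in reversed(range(len(iterations))):
--         filled_metrics[iterations[idx] - mn] = metrics[idx]
--     return filled_iterations, filled_metrics
-- ===== Notes on version B (the rewrite author's own statement) =====
-- stated objective: faster
-- what changed: Replaces the scan-the-range-with-membership-probe-and-index loop (each step scans iterations twice) by a preallocated default-filled array plus a single reverse-order scatter pass writing metrics[idx] at offset iterations[idx]-mn, so earliest occurrence wins.
-- outside the precondition, e.g. on fillMissingElements([0, 0], [5], 9): A returns ([0], [5]), B raises IndexError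
import Mathlib
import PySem

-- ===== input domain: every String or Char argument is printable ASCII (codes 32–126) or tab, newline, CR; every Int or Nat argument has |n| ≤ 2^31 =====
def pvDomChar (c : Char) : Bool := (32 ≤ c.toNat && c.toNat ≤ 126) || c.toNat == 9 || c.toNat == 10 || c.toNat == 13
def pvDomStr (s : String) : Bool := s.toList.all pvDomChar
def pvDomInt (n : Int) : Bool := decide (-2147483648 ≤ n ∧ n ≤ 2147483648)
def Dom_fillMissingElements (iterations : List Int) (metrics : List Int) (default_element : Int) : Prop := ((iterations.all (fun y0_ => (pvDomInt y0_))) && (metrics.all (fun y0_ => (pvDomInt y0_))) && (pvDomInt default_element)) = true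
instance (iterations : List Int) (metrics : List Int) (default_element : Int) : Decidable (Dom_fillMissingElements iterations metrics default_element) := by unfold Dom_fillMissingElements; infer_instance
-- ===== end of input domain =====

-- B replaces A's scan-the-range-with-membership-and-index-probe loop by a preallocated
-- default-filled metrics array plus a single reverse-order scatter pass (earliest occurrence wins).


-- ===== PORT A =====
def fillMissingElements (iterations : List Int) (metrics : List Int) (default_element : Int) : List Int × List Int :=
  match PySem.List.min? iterations (fun x => x), PySem.List.max? iterations (fun x => x) with
  | some mn, some mx =>
      (PySem.List.pyRange mn (mx + 1) 1).foldl
        (fun acc i =>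
          if i ∈ iterations then
            let index : Nat := (PySem.List.index? iterations i).getD 0
            (acc.1 ++ [PySem.List.pyGetD iterations (index : Int) 0],
             acc.2 ++ [PySem.List.pyGetD metrics (index : Int) 0])
          else
            (acc.1 ++ [i], acc.2 ++ [default_element]))
        ([], [])
  | _, _ => ([], [])   -- min()/max() of an empty list raise ValueError: outside Pre_

-- ===== PORT B =====
def fillMissingElements_alt (iterations : List Int) (metrics : List Int) (default_element : Int) : List Int × List Int :=
  match PySem.List.min? iterations (fun x => x) with
  | none => ([], [])   -- min() of an empty list raises ValueError: outside Pre_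
  | some mn =>
    match PySem.List.max? iterations (fun x => x) with
    | none => ([], [])
    | some mx =>
          let filled_iterations := PySem.List.pyRange mn (mx + 1) 1
          let filled_metrics :=
            ((PySem.List.pyRange 0 (iterations.length : Int) 1).reverse).foldl
              (fun fm idx =>
                PySem.List.pySetD fm (PySem.List.pyGetD iterations idx 0 - mn)
                  (PySem.List.pyGetD metrics idx 0))
              (List.replicate filled_iterations.length default_element)
          (filled_iterations, filled_metrics)

-- ===== PRECONDITION & SPEC =====
-- Pre_ excludes empty iterations (A's min() raises ValueError) and metrics shorter than
-- iterations: there B's single pass over all indices raises IndexError while A survives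
-- exactly when every first-occurrence index happens to be small (see claim cites).
def Pre_fillMissingElements (iterations : List Int) (metrics : List Int) (default_element : Int) : Prop :=
  iterations ≠ [] ∧ iterations.length ≤ metrics.length
instance (iterations : List Int) (metrics : List Int) (default_element : Int) : Decidable (Pre_fillMissingElements iterations metrics default_element) := by unfold Pre_fillMissingElements; infer_instance
def pvWitness_fillMissingElements : List Int × List Int × Int := ([1, 3], [7, 8], 0)

def Spec_fillMissingElements (iterations : List Int) (metrics : List Int) (default_element : Int) (out : List Int × List Int) : Prop := out = fillMissingElements_alt iterations metrics default_element
instance (iterations : List Int) (metrics : List Int) (default_element : Int) (out : List Int × List Int) : Decidable (Spec_fillMissingElements iterations metrics default_element out) := by unfold Spec_fillMissingElements; infer_instance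

-- ===== CLAIM (what is proved, stated in full; the proofs are below) =====
def Claim_equal_fillMissingElements : Prop := ∀ (iterations : List Int) (metrics : List Int) (default_element : Int), Dom_fillMissingElements iterations metrics default_element → Pre_fillMissingElements iterations metrics default_element → Spec_fillMissingElements iterations metrics default_element (fillMissingElements iterations metrics default_element)

-- ===== LEMMAS AND PROOFS =====

-- B's loop, abstracted: write m k at position P k, for k = n-1 … 0 (foldr form).
def pvScatter (P m : Nat → Int) (init : List Int) (n : Nat) : List Int :=
  List.foldr (fun k fm => PySem.List.pySetD fm (P k) (m k)) init (List.range n)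

theorem pvScatter_succ (P m : Nat → Int) (init : List Int) (n : Nat) :
    pvScatter P m init (n + 1) = pvScatter P m (PySem.List.pySetD init (P n) (m n)) n := by
  unfold pvScatter
  rw [List.range_succ, List.foldr_append]
  rfl

theorem pvFind?_range_none (q : Nat → Bool) :
    ∀ (n : Nat), (∀ k, k < n → q k = false) → List.find? q (List.range n) = none := by
  intro n
  induction n with
  | zero => intro _; simp
  | succ n ih =>
      intro h
      rw [List.range_succ, List.find?_append, ih (fun k hk => h k (by omega))]
      simp [h n (by omega)]

theorem pvFind?_range_some (q : Nat → Bool) (k : Nat) (hq : q k = true)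
    (hmin : ∀ i, i < k → q i = false) :
    ∀ (n : Nat), k < n → List.find? q (List.range n) = some k := by
  intro n
  induction n with
  | zero => intro h; omega
  | succ n ih =>
      intro hk
      rw [List.range_succ, List.find?_append]
      by_cases hlt : k < n
      · rw [ih hlt]; rfl
      · have hkn : k = n := by omega
        rw [pvFind?_range_none q n (fun i hi => hmin i (by omega))]
        simp [← hkn, hq]

theorem pvScatter_getElem? (P m : Nat → Int) :
    ∀ (n : Nat) (init : List Int),
      (∀ k, k < n → 0 ≤ P k ∧ (P k).toNat < init.length) → ∀ (j : Nat),
      (pvScatter P m init n)[j]? =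
        (match List.find? (fun k => (P k).toNat == j) (List.range n) with
         | some k => some (m k)
         | none => init[j]?) := by
  intro n
  induction n with
  | zero => intro init _ j; simp [pvScatter]
  | succ n ih =>
      intro init hpos j
      rw [pvScatter_succ]
      have hlen : (PySem.List.pySetD init (P n) (m n)).length = init.length :=
        PySem.List.length_pySetD init (P n) (m n)
      rw [ih _ (fun k hk => by rw [hlen]; exact hpos k (by omega)) j]
      rw [List.range_succ, List.find?_append]
      cases hfind : List.find? (fun k => (P k).toNat == j) (List.range n) with
      | some k => rfl
      | none =>
          obtain ⟨hP0, hPlt⟩ := hpos n (by omega)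
          rw [PySem.List.pySetD_of_nonneg init (m n) hP0]
          simp only [List.find?_cons, List.find?_nil]
          by_cases hj : (P n).toNat = j
          · have hb : ((P n).toNat == j) = true := by simp [hj]
            rw [hb]
            simp [hj, hj ▸ hPlt]
          · have hb : ((P n).toNat == j) = false := by simp [hj]
            rw [hb]
            simp [hj]

theorem pvFoldlPairIf (L : List Int) (c : Int → Prop) [DecidablePred c]
    (f1 f2 g1 g2 : Int → Int) :
    ∀ (a1 a2 : List Int),
      L.foldl (fun acc i =>
          if c i then (acc.1 ++ [f1 i], acc.2 ++ [f2 i])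
          else (acc.1 ++ [g1 i], acc.2 ++ [g2 i])) (a1, a2) =
        (a1 ++ L.map (fun i => if c i then f1 i else g1 i),
         a2 ++ L.map (fun i => if c i then f2 i else g2 i)) := by
  induction L with
  | nil => intro a1 a2; simp
  | cons x t ih =>
      intro a1 a2
      by_cases hx : c x <;> simp [List.foldl_cons, hx, ih]

-- ===== VERDICT (by name: the statement is the Claim_ definition above) =====
theorem fillMissingElements_spec : Claim_equal_fillMissingElements := by
  intro its ms d _ hpre
  obtain ⟨hne, hlen⟩ := hpre
  unfold Spec_fillMissingElements fillMissingElements fillMissingElements_alt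
  cases hmn : PySem.List.min? its (fun x => x) with
  | none => exact absurd ((PySem.List.min?_eq_none_iff its _).1 hmn) hne
  | some mn =>
  cases hmx : PySem.List.max? its (fun x => x) with
  | none => exact absurd ((PySem.List.max?_eq_none_iff its _).1 hmx) hne
  | some mx =>
  simp only []
  have hA := pvFoldlPairIf (PySem.List.pyRange mn (mx + 1) 1) (fun i => i ∈ its)
    (fun i => PySem.List.pyGetD its (((PySem.List.index? its i).getD 0 : Nat) : Int) 0)
    (fun i => PySem.List.pyGetD ms (((PySem.List.index? its i).getD 0 : Nat) : Int) 0)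
    (fun i => i) (fun _ => d) [] []
  rw [hA]
  simp only [List.nil_append]
  have hmnle : ∀ y ∈ its, mn ≤ y := fun y hy => PySem.List.min?_isMin hmn y hy
  have hmxge : ∀ y ∈ its, y ≤ mx := fun y hy => PySem.List.max?_isMax hmx y hy
  refine Prod.ext ?_ ?_
  · -- first components: every range element i with i ∈ its maps back to itself
    show List.map _ (PySem.List.pyRange mn (mx + 1) 1) = PySem.List.pyRange mn (mx + 1) 1
    have hid : ∀ i ∈ PySem.List.pyRange mn (mx + 1) 1,
        (if i ∈ its then PySem.List.pyGetD its (((PySem.List.index? its i).getD 0 : Nat) : Int) 0 else i) = i := by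
      intro i _
      by_cases hi : i ∈ its
      · cases hidx : PySem.List.index? its i with
        | none =>
            have hs := (PySem.List.index?_isSome_iff its i).2 hi
            rw [hidx] at hs
            simp at hs
        | some t =>
            obtain ⟨ht, hval, -⟩ := PySem.List.getElem_of_index?_eq_some hidx
            rw [if_pos hi]
            simp only [Option.getD_some]
            rw [PySem.List.pyGetD_natCast, List.getD_eq_getElem its 0 ht, hval]
      · rw [if_neg hi]
    rw [List.map_congr_left hid]; exact List.map_id _
  · -- second components
    show List.map _ (PySem.List.pyRange mn (mx + 1) 1) = _
    have hloop : List.foldl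
          (fun fm idx => PySem.List.pySetD fm (PySem.List.pyGetD its idx 0 - mn) (PySem.List.pyGetD ms idx 0))
          (List.replicate (PySem.List.pyRange mn (mx + 1) 1).length d)
          (PySem.List.pyRange 0 (its.length : Int) 1).reverse =
        pvScatter (fun k => PySem.List.pyGetD its ((k : Nat) : Int) 0 - mn)
          (fun k => PySem.List.pyGetD ms ((k : Nat) : Int) 0)
          (List.replicate (PySem.List.pyRange mn (mx + 1) 1).length d) its.length := by
      rw [PySem.List.pyRange_zero_nat, ← List.map_reverse, List.foldl_map, List.foldl_reverse]
      rfl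
    rw [hloop]
    have hRl : (List.replicate (PySem.List.pyRange mn (mx + 1) 1).length d).length = (mx + 1 - mn).toNat := by
      simp [PySem.List.length_pyRange_one]
    have hpos : ∀ k, k < its.length →
        0 ≤ PySem.List.pyGetD its ((k : Nat) : Int) 0 - mn ∧
        (PySem.List.pyGetD its ((k : Nat) : Int) 0 - mn).toNat <
          (List.replicate (PySem.List.pyRange mn (mx + 1) 1).length d).length := by
      intro k hk
      rw [PySem.List.pyGetD_natCast, List.getD_eq_getElem its 0 hk, hRl]
      have h1 := hmnle _ (List.getElem_mem hk)
      have h2 := hmxge _ (List.getElem_mem hk)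
      omega
    apply List.ext_getElem?
    intro j
    rw [pvScatter_getElem? _ _ its.length _ hpos j]
    by_cases hj : j < (mx + 1 - mn).toNat
    · rw [List.getElem?_map, PySem.List.getElem?_pyRange_one, if_pos hj]
      simp only [Option.map_some]
      by_cases hv : (mn + (j : Int)) ∈ its
      · cases hidx : PySem.List.index? its (mn + (j : Int)) with
        | none =>
            have hs := (PySem.List.index?_isSome_iff its _).2 hv
            rw [hidx] at hs
            simp at hs
        | some t =>
            obtain ⟨ht, hval, hminp⟩ := PySem.List.getElem_of_index?_eq_some hidx
            have hq : (((fun k => PySem.List.pyGetD its ((k : Nat) : Int) 0 - mn) t).toNat == j) = true := by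
              simp only [PySem.List.pyGetD_natCast, List.getD_eq_getElem its 0 ht, hval]
              simp only [beq_iff_eq]
              omega
            have hminq : ∀ i, i < t →
                (((fun k => PySem.List.pyGetD its ((k : Nat) : Int) 0 - mn) i).toNat == j) = false := by
              intro i hi
              have hi' : i < its.length := by omega
              have hne' := hminp i hi
              have h1 := hmnle _ (List.getElem_mem hi')
              simp only [PySem.List.pyGetD_natCast, List.getD_eq_getElem its 0 hi']
              simp only [beq_eq_false_iff_ne]
              omega
            rw [pvFind?_range_some _ t hq hminq its.length ht]
            rw [if_pos hv]
            rfl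
      · have hnone : ∀ k, k < its.length →
            (((fun k => PySem.List.pyGetD its ((k : Nat) : Int) 0 - mn) k).toNat == j) = false := by
          intro k hk
          have h1 := hmnle _ (List.getElem_mem hk)
          have hne' : its[k] ≠ mn + (j : Int) := fun h => hv (h ▸ List.getElem_mem hk)
          simp only [PySem.List.pyGetD_natCast, List.getD_eq_getElem its 0 hk]
          simp only [beq_eq_false_iff_ne]
          omega
        rw [pvFind?_range_none _ _ hnone]
        rw [if_neg hv]
        rw [List.getElem?_replicate, if_pos (by rw [PySem.List.length_pyRange_one]; exact hj)]
    · have hnone : ∀ k, k < its.length →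
          (((fun k => PySem.List.pyGetD its ((k : Nat) : Int) 0 - mn) k).toNat == j) = false := by
        intro k hk
        have h2 := (hpos k hk).2
        rw [hRl] at h2
        simp only [beq_eq_false_iff_ne]
        omega
      rw [pvFind?_range_none _ _ hnone]
      rw [List.getElem?_eq_none (by simp [PySem.List.length_pyRange_one]; omega),
          List.getElem?_eq_none (by rw [hRl]; omega)]
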